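-- pv_equiv track=rewrite | github.com/max-miller1204/march-madness-analytics | scripts/refresh/scrape_results.py | _find_game_id
-- ===== SOURCE A (Python) =====
-- REGION_PREFIXES = {
--     "East": "E",
--     "South": "S",
--     "West": "W",
--     "Midwest": "M",
-- }
--
-- PLAYIN_TEAMS = {
--     "NC State/Texas": ["NC State", "Texas"],
--     "SMU/Miami (OH)": ["SMU", "Miami (OH)"],
--     "Howard/UMBC": ["Howard", "UMBC"],
--     "Lehigh/Prairie View A&M": ["Lehigh", "Prairie View A&M"],
-- }
--
-- def _find_game_id(team_a, team_b, bracket_games, existing_ids):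
--     """Derive a game ID from bracket.csv for two competing teams.
--
--     Returns the GameID column from bracket.csv if the matchup matches
--     (order-independent).  Falls back to generating a synthetic ID.
--     """
--     for row in bracket_games:
--         row_teams = set()
--         for col in ("TeamA", "TeamB"):
--             raw = row[col].strip()
--             if raw in PLAYIN_TEAMS:
--                 row_teams.update(PLAYIN_TEAMS[raw])
--             else:
--                 row_teams.add(raw)
--         if team_a in row_teams and team_b in row_teams:
--             return row.get("GameID", "").strip()
--
--     # Synthetic fallback for later rounds not pre-listed in bracket.csv
--     region = None
--     for row in bracket_games:
--         for col in ("TeamA", "TeamB"):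
--             raw = row[col].strip()
--             expanded = PLAYIN_TEAMS.get(raw, [raw])
--             if team_a in expanded or team_b in expanded:
--                 region = row.get("Region", "").strip()
--                 break
--         if region:
--             break
--
--     prefix = REGION_PREFIXES.get(region, "X")
--     idx = 1
--     while f"{prefix}{idx}" in existing_ids:
--         idx += 1
--     return f"{prefix}{idx}"
-- ===== SOURCE B (Python) =====
-- REGION_PREFIXES = {
--     "East": "E",
--     "South": "S",
--     "West": "W",
--     "Midwest": "M",
-- }
--
-- PLAYIN_TEAMS = {
--     "NC State/Texas": ["NC State", "Texas"],
--     "SMU/Miami (OH)": ["SMU", "Miami (OH)"],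
--     "Howard/UMBC": ["Howard", "UMBC"],
--     "Lehigh/Prairie View A&M": ["Lehigh", "Prairie View A&M"],
-- }
--
-- def _find_game_id(team_a, team_b, bracket_games, existing_ids):
--     """Single pass over bracket_games: return the GameID of a full matchup
--     immediately, while latching the first non-empty Region of any row
--     mentioning either team as the fallback region."""
--     fallback_region = None
--     for row in bracket_games:
--         row_teams = set()
--         for col in ("TeamA", "TeamB"):
--             raw = row[col].strip()
--             row_teams.update(PLAYIN_TEAMS.get(raw, [raw]))
--         if team_a in row_teams and team_b in row_teams:
--             return row.get("GameID", "").strip()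
--         if fallback_region is None and (team_a in row_teams or team_b in row_teams):
--             region = row.get("Region", "").strip()
--             if region:
--                 fallback_region = region
--
--     prefix = REGION_PREFIXES.get(fallback_region, "X")
--     ids = set(existing_ids)
--     idx = 1
--     while f"{prefix}{idx}" in ids:
--         idx += 1
--     return f"{prefix}{idx}"
-- ===== Notes on version B (the rewrite author's own statement) =====
-- stated objective: simpler
-- what changed: B replaces A's two full scans of bracket_games (one for the exact matchup, a second restarted scan for the fallback region) with a single pass that returns the GameID on a full match and latches the first non-empty Region of any row mentioning either team, then generates the synthetic id against a set of existing ids.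
import Mathlib
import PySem

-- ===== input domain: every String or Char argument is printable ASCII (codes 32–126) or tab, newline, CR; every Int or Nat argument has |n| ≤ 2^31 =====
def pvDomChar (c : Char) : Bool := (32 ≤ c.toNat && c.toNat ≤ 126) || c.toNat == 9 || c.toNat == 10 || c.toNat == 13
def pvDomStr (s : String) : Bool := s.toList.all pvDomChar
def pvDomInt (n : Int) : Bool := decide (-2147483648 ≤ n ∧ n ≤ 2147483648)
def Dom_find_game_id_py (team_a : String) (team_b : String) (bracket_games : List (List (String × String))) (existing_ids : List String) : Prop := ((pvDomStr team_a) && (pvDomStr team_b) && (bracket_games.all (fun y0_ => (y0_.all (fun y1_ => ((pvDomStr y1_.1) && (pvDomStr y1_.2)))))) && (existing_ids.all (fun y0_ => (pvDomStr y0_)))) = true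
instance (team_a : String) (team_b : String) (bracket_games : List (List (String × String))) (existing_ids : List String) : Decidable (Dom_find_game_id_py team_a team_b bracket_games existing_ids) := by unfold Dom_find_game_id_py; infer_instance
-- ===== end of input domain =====

-- B fuses A's two scans of bracket_games into one pass that latches the fallback region; objective: simpler (one traversal instead of two).

-- shared module-level constants of the Python file
def pyPlayin : PySem.Dict String (List String) :=
  PySem.Dict.mk [("NC State/Texas", ["NC State", "Texas"]),
                 ("SMU/Miami (OH)", ["SMU", "Miami (OH)"]),
                 ("Howard/UMBC", ["Howard", "UMBC"]),
                 ("Lehigh/Prairie View A&M", ["Lehigh", "Prairie View A&M"])]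

def pyRegionPrefixes : PySem.Dict String String :=
  PySem.Dict.mk [("East", "E"), ("South", "S"), ("West", "W"), ("Midwest", "M")]

-- row[col].strip() (total form of row[col]: Pre_ guarantees the key is present) and row.get(key, "").strip()
def pvStripGet (row : List (String × String)) (col : String) : String :=
  PySem.Str.strip (((PySem.Dict.mk row).get? col).getD "")

-- Python truthiness of an Optional[str]
def pyTruthy : Option String → Bool
  | none => false
  | some s => !(s == "")

-- REGION_PREFIXES.get(region, "X") with region an Optional[str]
def pvPrefixOf : Option String → String
  | none => "X"
  | some r => ((pyRegionPrefixes.get? r).getD "X")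

-- ===== PORT A =====
-- row_teams set of A's first loop
def pvRowSetA (row : List (String × String)) : PySem.Set String :=
  (["TeamA", "TeamB"]).foldl (fun s col =>
    let raw := pvStripGet row col
    match pyPlayin.get? raw with
    | some ts => PySem.Set.update s ts
    | none => PySem.Set.add s raw) PySem.Set.empty

-- A's first loop: first row whose expanded team set contains both teams
def pvLoop1A (ta tb : String) : List (List (String × String)) → Option String
  | [] => none
  | r :: rs =>
    let s := pvRowSetA r
    if s.contains ta && s.contains tb then some (pvStripGet r "GameID")
    else pvLoop1A ta tb rs

-- inner 'for col in ("TeamA","TeamB")' of A's second loop (break on first match)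
def pvInnerRegion (ta tb : String) (r : List (String × String)) : List String → Option String → Option String
  | [], reg => reg
  | c :: cs, reg =>
    let raw := pvStripGet r c
    let exp := (pyPlayin.get? raw).getD [raw]
    if exp.contains ta || exp.contains tb then some (pvStripGet r "Region")
    else pvInnerRegion ta tb r cs reg

-- A's second loop ('if region: break')
def pvLoop2A (ta tb : String) : List (List (String × String)) → Option String → Option String
  | [], reg => reg
  | r :: rs, reg =>
    let reg2 := pvInnerRegion ta tb r ["TeamA", "TeamB"] reg
    if pyTruthy reg2 then reg2 else pvLoop2A ta tb rs reg2

-- while f"{prefix}{idx}" in existing_ids; fuel existing_ids.length + 1 suffices (candidates are distinct)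
def pvSynthA (pre : String) (existing : List String) : Nat → Int → String
  | 0, idx => pre ++ PySem.Int.toStr idx
  | fuel + 1, idx =>
    if existing.contains (pre ++ PySem.Int.toStr idx) then pvSynthA pre existing fuel (idx + 1)
    else pre ++ PySem.Int.toStr idx

def find_game_id_py (team_a : String) (team_b : String) (bracket_games : List (List (String × String))) (existing_ids : List String) : String :=
  match pvLoop1A team_a team_b bracket_games with
  | some g => g
  | none =>
    let region := pvLoop2A team_a team_b bracket_games none
    let pre := pvPrefixOf region
    pvSynthA pre existing_ids (existing_ids.length + 1) 1

-- ===== PORT B =====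
-- row_teams of Source B: update with PLAYIN_TEAMS.get(raw, [raw]) for both columns
def pvRowSetB (row : List (String × String)) : PySem.Set String :=
  (["TeamA", "TeamB"]).foldl (fun s col =>
    let raw := pvStripGet row col
    PySem.Set.update s ((pyPlayin.get? raw).getD [raw])) PySem.Set.empty

-- Source B's single pass: early return of the GameID (.inl), else the latched fallback region (.inr)
def pvScanB (ta tb : String) : List (List (String × String)) → Option String → String ⊕ Option String
  | [], reg => .inr reg
  | r :: rs, reg =>
    let s := pvRowSetB r
    if s.contains ta && s.contains tb then .inl (pvStripGet r "GameID")
    else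
      let reg' :=
        if reg.isNone && (s.contains ta || s.contains tb) then
          (let v := pvStripGet r "Region"; if v == "" then reg else some v)
        else reg
      pvScanB ta tb rs reg'

-- while f"{prefix}{idx}" in ids (a set); same fuel bound as A's port
def pvSynthB (pre : String) (ids : PySem.Set String) : Nat → Int → String
  | 0, idx => pre ++ PySem.Int.toStr idx
  | fuel + 1, idx =>
    if ids.contains (pre ++ PySem.Int.toStr idx) then pvSynthB pre ids fuel (idx + 1)
    else pre ++ PySem.Int.toStr idx

def find_game_id_py_alt (team_a : String) (team_b : String) (bracket_games : List (List (String × String))) (existing_ids : List String) : String :=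
  match pvScanB team_a team_b bracket_games none with
  | .inl g => g
  | .inr fallback =>
    let pre := pvPrefixOf fallback
    let ids := PySem.Set.ofList existing_ids
    pvSynthB pre ids (existing_ids.length + 1) 1

-- ===== PRECONDITION & SPEC =====
-- Pre_ excludes exactly the inputs where Python's row["TeamA"] / row["TeamB"] raises KeyError (both A and B raise there).
def Pre_find_game_id_py (team_a : String) (team_b : String) (bracket_games : List (List (String × String))) (existing_ids : List String) : Prop :=
  ∀ row ∈ bracket_games, (PySem.Dict.mk row).contains "TeamA" = true ∧ (PySem.Dict.mk row).contains "TeamB" = true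
instance (team_a : String) (team_b : String) (bracket_games : List (List (String × String))) (existing_ids : List String) : Decidable (Pre_find_game_id_py team_a team_b bracket_games existing_ids) := by unfold Pre_find_game_id_py; infer_instance

def pvWitness_find_game_id_py : String × String × (List (List (String × String))) × List String :=
  ("Duke", "UNC", [[("TeamA", "Duke"), ("TeamB", "UNC"), ("GameID", "E1"), ("Region", "East")]], ["E1"])

def Spec_find_game_id_py (team_a : String) (team_b : String) (bracket_games : List (List (String × String))) (existing_ids : List String) (out : String) : Prop := out = find_game_id_py_alt team_a team_b bracket_games existing_ids
instance (team_a : String) (team_b : String) (bracket_games : List (List (String × String))) (existing_ids : List String) (out : String) : Decidable (Spec_find_game_id_py team_a team_b bracket_games existing_ids out) := by unfold Spec_find_game_id_py; infer_instance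

-- ===== CLAIM (what is proved, stated in full; the proofs are below) =====
def Claim_equal_find_game_id_py : Prop := ∀ (team_a : String) (team_b : String) (bracket_games : List (List (String × String))) (existing_ids : List String), Dom_find_game_id_py team_a team_b bracket_games existing_ids → Pre_find_game_id_py team_a team_b bracket_games existing_ids → Spec_find_game_id_py team_a team_b bracket_games existing_ids (find_game_id_py team_a team_b bracket_games existing_ids)

-- ===== LEMMAS AND PROOFS =====

-- the two row-team sets coincide
lemma update_singleton (s : PySem.Set String) (x : String) :
    PySem.Set.update s [x] = PySem.Set.add s x := rfl

lemma rowSet_eq (row : List (String × String)) : pvRowSetA row = pvRowSetB row := by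
  unfold pvRowSetA pvRowSetB
  simp only [List.foldl]
  cases h1 : pyPlayin.get? (pvStripGet row "TeamA") <;>
    cases h2 : pyPlayin.get? (pvStripGet row "TeamB") <;>
      simp only [Option.getD_some, Option.getD_none, update_singleton]

-- membership in the fused row set, column by column
lemma rowSetB_contains (r : List (String × String)) (x : String) :
    (pvRowSetB r).contains x =
      (((pyPlayin.get? (pvStripGet r "TeamA")).getD [pvStripGet r "TeamA"]).contains x ||
       ((pyPlayin.get? (pvStripGet r "TeamB")).getD [pvStripGet r "TeamB"]).contains x) := by
  rw [Bool.eq_iff_iff]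
  unfold pvRowSetB
  simp only [List.foldl]
  simp [PySem.Set.mem_update, PySem.Set.empty]

-- the inner column loop of A fires iff either team is in the fused row set
lemma innerRegion_eq (ta tb : String) (r : List (String × String)) (reg : Option String) :
    pvInnerRegion ta tb r ["TeamA", "TeamB"] reg =
      (if (pvRowSetB r).contains ta || (pvRowSetB r).contains tb then some (pvStripGet r "Region") else reg) := by
  simp only [pvInnerRegion, rowSetB_contains]
  cases hA1 : ((pyPlayin.get? (pvStripGet r "TeamA")).getD [pvStripGet r "TeamA"]).contains ta <;>
    cases hA2 : ((pyPlayin.get? (pvStripGet r "TeamA")).getD [pvStripGet r "TeamA"]).contains tb <;>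
      cases hB1 : ((pyPlayin.get? (pvStripGet r "TeamB")).getD [pvStripGet r "TeamB"]).contains ta <;>
        cases hB2 : ((pyPlayin.get? (pvStripGet r "TeamB")).getD [pvStripGet r "TeamB"]).contains tb <;>
          simp only [hA1, hA2, hB1, hB2, Bool.false_or, Bool.true_or, Bool.or_true, Bool.or_false,
            Bool.false_eq_true, if_true, if_false]

-- a non-truthy region yields the default prefix
lemma prefixOf_nontruthy (reg : Option String) (h : pyTruthy reg = false) : pvPrefixOf reg = "X" := by
  cases reg with
  | none => rfl
  | some s =>
    simp [pyTruthy] at h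
    subst h
    decide

-- a full match found by A's first loop is returned by B's scan with any latched state
lemma scanB_of_loop1_some (ta tb : String) (rows : List (List (String × String))) (reg : Option String) (g : String)
    (h : pvLoop1A ta tb rows = some g) : pvScanB ta tb rows reg = .inl g := by
  induction rows generalizing reg with
  | nil => simp [pvLoop1A] at h
  | cons r rs ih =>
    unfold pvLoop1A at h
    unfold pvScanB
    rw [rowSet_eq] at h
    cases hc : (pvRowSetB r).contains ta && (pvRowSetB r).contains tb <;>
      simp only [hc, Bool.false_eq_true, if_false, if_true] at h ⊢
    · exact ih _ h
    · simpa using h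

-- once the region is latched and no full match remains, B's scan keeps it
lemma scanB_latched (ta tb : String) (rows : List (List (String × String))) (v : String)
    (h : pvLoop1A ta tb rows = none) : pvScanB ta tb rows (some v) = .inr (some v) := by
  induction rows with
  | nil => rfl
  | cons r rs ih =>
    unfold pvLoop1A at h
    unfold pvScanB
    rw [rowSet_eq] at h
    cases hc : (pvRowSetB r).contains ta && (pvRowSetB r).contains tb <;>
      simp only [hc, Bool.false_eq_true, if_false, if_true, Option.isNone_some, Bool.false_and] at h ⊢
    · exact ih h
    · simp at h

-- no full match: B's scan ends with a region giving the same prefix as A's second loop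
lemma scanB_of_loop1_none (ta tb : String) (rows : List (List (String × String))) (regA : Option String)
    (h : pvLoop1A ta tb rows = none) (hA : pyTruthy regA = false) :
    ∃ r', pvScanB ta tb rows none = .inr r' ∧ pvPrefixOf (pvLoop2A ta tb rows regA) = pvPrefixOf r' := by
  induction rows generalizing regA with
  | nil =>
    exact ⟨none, rfl, by rw [pvLoop2A, prefixOf_nontruthy regA hA]; rfl⟩
  | cons r rs ih =>
    unfold pvLoop1A at h
    rw [rowSet_eq] at h
    cases hc : (pvRowSetB r).contains ta && (pvRowSetB r).contains tb <;>
      simp only [hc, Bool.false_eq_true, if_false, if_true] at h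
    case true => exact absurd h (by simp)
    unfold pvScanB pvLoop2A
    rw [innerRegion_eq]
    cases hm : (pvRowSetB r).contains ta || (pvRowSetB r).contains tb <;>
      simp only [hc, hm, Bool.false_eq_true, if_false, if_true, Option.isNone_none, Bool.true_and]
    · -- neither team in the row: both states unchanged
      obtain ⟨r', h1, h2⟩ := ih regA h hA
      exact ⟨r', h1, by rw [if_neg (by simp [hA]), h2]⟩
    · cases hv : pvStripGet r "Region" == ""
      · -- non-empty region: A breaks, B latches it for good
        have hv' : pvStripGet r "Region" ≠ "" := by simpa using hv
        refine ⟨some (pvStripGet r "Region"), ?_, ?_⟩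
        · simp only [Bool.false_eq_true, if_false]
          exact scanB_latched ta tb rs _ h
        · rw [if_pos (by simp [pyTruthy, hv'])]
      · -- empty region: A carries some "", B keeps none
        have hv' : pvStripGet r "Region" = "" := by simpa using hv
        simp only [if_true]
        have ht : pyTruthy (some (pvStripGet r "Region")) = false := by
          simp [pyTruthy, hv']
        obtain ⟨r', h1, h2⟩ := ih (some (pvStripGet r "Region")) h ht
        exact ⟨r', h1, by rw [if_neg (by simp [ht]), h2]⟩

-- the two synthetic-id loops agree (set membership = list membership)
lemma synth_eq (pre : String) (existing : List String) (fuel : Nat) (idx : Int) :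
    pvSynthA pre existing fuel idx = pvSynthB pre (PySem.Set.ofList existing) fuel idx := by
  induction fuel generalizing idx with
  | zero => rfl
  | succ n ih =>
    unfold pvSynthA pvSynthB
    have hm : (PySem.Set.ofList existing).contains (pre ++ PySem.Int.toStr idx) =
        existing.contains (pre ++ PySem.Int.toStr idx) := by
      rw [Bool.eq_iff_iff]
      simp [PySem.Set.mem_ofList]
    rw [hm]
    cases hc : existing.contains (pre ++ PySem.Int.toStr idx) <;>
      simp only [hc, Bool.false_eq_true, if_false, if_true]
    exact ih _

-- ===== VERDICT (by name: the statement is the Claim_ definition above) =====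
theorem find_game_id_py_spec : Claim_equal_find_game_id_py := by
  intro ta tb bg ex _ _
  unfold Spec_find_game_id_py find_game_id_py find_game_id_py_alt
  cases h : pvLoop1A ta tb bg with
  | some g => rw [scanB_of_loop1_some ta tb bg none g h]
  | none =>
    obtain ⟨r', hs, hp⟩ := scanB_of_loop1_none ta tb bg none h rfl
    simp only [hs, hp, synth_eq]
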